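-- pv_equiv track=rewrite | github.com/sagrawal0410/dreamzero | scripts/stage4/closed_loop_compute.py | _select_episodes
-- ===== SOURCE A (Python) =====
-- from collections import defaultdict
-- from typing import Any
--
-- def _select_episodes(by_ep: dict[int, list[dict[str, Any]]],
--                      num: int, group_balanced: bool) -> list[int]:
--     """Pick episode_indices, optionally stratified across task_groups."""
--     if not group_balanced:
--         return list(by_ep.keys())[:num]
--     by_group: dict[str, list[int]] = defaultdict(list)
--     for ep, entries in by_ep.items():
--         # The episode's task group equals its first entry's task_group.
--         g = (entries[0] or {}).get("task_group", "unknown")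
--         by_group[g].append(ep)
--     keys = sorted(by_group.keys())
--     chosen: list[int] = []
--     while len(chosen) < num and keys:
--         for k in list(keys):
--             if not by_group[k]:
--                 keys.remove(k); continue
--             chosen.append(by_group[k].pop(0))
--             if len(chosen) >= num:
--                 break
--     return chosen[:num]
-- ===== SOURCE B (Python) =====
-- from collections import defaultdict
--
-- def _select_episodes(by_ep, num, group_balanced):
--     """Pick episode_indices, optionally stratified across task_groups."""
--     if not group_balanced:
--         return list(by_ep.keys())[:num]
--     by_group = defaultdict(list)
--     for ep, entries in by_ep.items():
--         g = (entries[0] or {}).get("task_group", "unknown")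
--         by_group[g].append(ep)
--     # round-robin by whole rounds: round r takes the r-th element of every group
--     # still holding one (groups in sorted-key order); no mutation, no per-pick bookkeeping
--     cols = [by_group[k] for k in sorted(by_group)]
--     chosen = []
--     r = 0
--     while len(chosen) < num:
--         cols = [col for col in cols if r < len(col)]
--         if not cols:
--             break
--         chosen.extend(col[r] for col in cols)
--         r += 1
--     return chosen[:num]
-- ===== Notes on version B (the rewrite author's own statement) =====
-- stated objective: alternative
-- what changed: A round-robins by repeatedly mutating state (list.pop(0) per pick, keys.remove on emptied groups, a per-pick budget check with break); B never mutates the groups: it iterates a round index r, keeps only the still-live groups, collects the whole r-th layer across them in one comprehension, and cuts the result to num once at the end.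
import Mathlib
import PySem

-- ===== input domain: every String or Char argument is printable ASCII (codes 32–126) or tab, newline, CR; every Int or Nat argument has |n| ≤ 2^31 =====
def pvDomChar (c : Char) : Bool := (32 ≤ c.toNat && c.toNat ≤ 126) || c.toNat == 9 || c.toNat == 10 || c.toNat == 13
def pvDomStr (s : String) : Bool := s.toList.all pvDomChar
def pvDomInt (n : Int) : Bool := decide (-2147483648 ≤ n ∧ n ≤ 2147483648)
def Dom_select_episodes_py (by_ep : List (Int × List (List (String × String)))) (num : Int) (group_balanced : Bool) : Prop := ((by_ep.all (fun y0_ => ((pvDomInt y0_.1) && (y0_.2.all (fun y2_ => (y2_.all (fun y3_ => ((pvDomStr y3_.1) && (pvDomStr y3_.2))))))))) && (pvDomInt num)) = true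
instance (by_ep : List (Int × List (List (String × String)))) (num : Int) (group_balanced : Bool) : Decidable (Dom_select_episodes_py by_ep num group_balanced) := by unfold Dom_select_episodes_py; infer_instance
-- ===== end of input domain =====

-- B replaces A's stateful round-robin (pop(0) from each group, keys.remove, per-pick
-- budget check and break) by a by-rounds traversal: round r collects the r-th element of
-- every still-live group at once, and the result is cut to num once at the end.

-- ===== PORT A =====
-- g = (entries[0] or {}).get("task_group", "unknown"); the `or {}` is a no-op for .get
-- (entries[0] is total here via pyGetD: Pre_ excludes empty entry lists, where Python raises IndexError)
def pvGroupKey (entries : List (List (String × String))) : String :=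
  (PySem.Dict.ofList (PySem.List.pyGetD entries 0 [])).getD "task_group" "unknown"

-- the inner `for k in list(keys)` pass: returns (keys, by_group, chosen) after the pass
def pvPassA (num : Int) : List String → List String → PySem.Dict String (List Int) → List Int → List String × PySem.Dict String (List Int) × List Int
  | [], keys, g, c => (keys, g, c)
  | k :: s, keys, g, c =>
    match g.getD k [] with
    | [] => pvPassA num s ((PySem.List.remove? keys k).getD keys) g c  -- keys.remove(k) (k is in keys, so remove? is some)
    | e :: t =>
      if num ≤ ((c ++ [e]).length : Int) then (keys, g.insert k t, c ++ [e])  -- break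
      else pvPassA num s keys (g.insert k t) (c ++ [e])

-- lemmas the termination argument of pvLoopA cites
theorem pvPassA_chosen_le (num : Int) : ∀ (s keys : List String) (g : PySem.Dict String (List Int)) (c : List Int), c.length ≤ (pvPassA num s keys g c).2.2.length := by
  intro s
  induction s with
  | nil => intro keys g c; simp [pvPassA]
  | cons k s ih =>
    intro keys g c
    cases hgk : g.getD k [] with
    | nil => simpa [pvPassA, hgk] using ih _ g c
    | cons e t =>
      simp only [pvPassA, hgk]
      split
      · simp
      · calc c.length ≤ (c ++ [e]).length := by simp
          _ ≤ _ := ih _ _ _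

theorem pvRemoveGetD_sublist {l : List String} {k : String} : List.Sublist ((PySem.List.remove? l k).getD l) l := by
  by_cases hm : k ∈ l
  · rw [PySem.List.remove?_eq_some_erase l k hm]
    simpa using List.erase_sublist
  · rw [(PySem.List.remove?_eq_none_iff l k).mpr hm]
    simp

theorem pvPassA_keys_sublist (num : Int) : ∀ (s keys : List String) (g : PySem.Dict String (List Int)) (c : List Int), List.Sublist (pvPassA num s keys g c).1 keys := by
  intro s
  induction s with
  | nil => intro keys g c; simp [pvPassA]
  | cons k s ih =>
    intro keys g c
    cases hgk : g.getD k [] with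
    | nil =>
      simp only [pvPassA, hgk]
      exact (ih _ g c).trans pvRemoveGetD_sublist
    | cons e t =>
      simp only [pvPassA, hgk]
      split
      · simp
      · exact ih _ _ _

theorem pvPassA_head (num : Int) (k : String) (rest : List String) (g : PySem.Dict String (List Int)) (c : List Int)
    (h : (pvPassA num (k :: rest) (k :: rest) g c).2.2.length = c.length) :
    (pvPassA num (k :: rest) (k :: rest) g c).1.length < (k :: rest).length := by
  cases hgk : g.getD k [] with
  | nil =>
    simp only [pvPassA, hgk, PySem.List.remove?_cons_self, Option.getD_some]
    have := (pvPassA_keys_sublist num rest rest g c).length_le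
    simpa using Nat.lt_succ_of_le this
  | cons e t =>
    exfalso
    simp only [pvPassA, hgk] at h
    split at h
    · simp at h
    · have := pvPassA_chosen_le num rest (k :: rest) (g.insert k t) (c ++ [e])
      simp at this
      omega

def pvLoopA (num : Int) (keys : List String) (g : PySem.Dict String (List Int)) (c : List Int) : List Int :=
  if h : (c.length : Int) < num ∧ keys ≠ [] then
    let st := pvPassA num keys keys g c
    pvLoopA num st.1 st.2.1 st.2.2
  else c
termination_by ((num - c.length).toNat, keys.length)
decreasing_by
  by_cases hgrow : c.length < (pvPassA num keys keys g c).2.2.length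
  · exact Prod.Lex.left _ _ (by omega)
  · have hle := pvPassA_chosen_le num keys keys g c
    have heq : (pvPassA num keys keys g c).2.2.length = c.length := by omega
    obtain ⟨k, rest, rfl⟩ := List.exists_cons_of_ne_nil h.2
    have hlt := pvPassA_head num k rest g c heq
    rw [heq]
    exact Prod.Lex.right _ hlt

def select_episodes_py (by_ep : List (Int × List (List (String × String)))) (num : Int) (group_balanced : Bool) : List Int :=
  let d := PySem.Dict.ofList by_ep
  if group_balanced = false then PySem.List.slice d.keys none (some num)  -- list(by_ep.keys())[:num]
  else
    let by_group := d.items.foldl (fun bg p => bg.modify (pvGroupKey p.2) [] (fun l => l ++ [p.1])) PySem.Dict.empty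
    let keys := PySem.List.sorted by_group.keys (fun k => k) false
    let chosen := pvLoopA num keys by_group []
    PySem.List.slice chosen none (some num)  -- chosen[:num]

-- ===== PORT B =====
-- `while len(chosen) < num:` collect layer r (= r-th element of every group), stop on empty layer
-- cols = [col for col in cols if r < len(col)]
def pvAlive (cols : List (List Int)) (r : Int) : List (List Int) :=
  cols.filter (fun col => r < (col.length : Int))

-- chosen.extend(col[r] for col in cols)
def pvLayerB (cols : List (List Int)) (r : Int) : List Int :=
  cols.map (fun col => PySem.List.pyGetD col r 0)

def pvLoopB (num : Int) (cols : List (List Int)) (r : Int) (chosen : List Int) : List Int :=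
  if h : (chosen.length : Int) < num then
    if hl : pvAlive cols r = [] then chosen
    else pvLoopB num (pvAlive cols r) (r + 1) (chosen ++ pvLayerB (pvAlive cols r) r)
  else chosen
termination_by (num - chosen.length).toNat
decreasing_by
  have h1 : 0 < (pvLayerB (pvAlive cols r) r).length := by
    rw [pvLayerB, List.length_map]
    exact List.length_pos_iff.mpr hl
  have h2 : (chosen ++ pvLayerB (pvAlive cols r) r).length = chosen.length + (pvLayerB (pvAlive cols r) r).length := List.length_append ..
  rw [h2]
  omega

def select_episodes_py_alt (by_ep : List (Int × List (List (String × String)))) (num : Int) (group_balanced : Bool) : List Int :=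
  let d := PySem.Dict.ofList by_ep
  if group_balanced = false then PySem.List.slice d.keys none (some num)  -- list(by_ep.keys())[:num]
  else
    let by_group := d.items.foldl (fun bg p => bg.modify (pvGroupKey p.2) [] (fun l => l ++ [p.1])) PySem.Dict.empty
    let cols := (PySem.List.sorted by_group.keys (fun k => k) false).map (fun k => by_group.getD k [])
    PySem.List.slice (pvLoopB num cols 0 []) none (some num)  -- chosen[:num]

-- ===== PRECONDITION & SPEC =====
-- Pre_ excludes exactly the inputs where Python A raises IndexError (an episode whose
-- entry list is empty, dereferenced by entries[0] when group_balanced is set); B raises there too.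
def Pre_select_episodes_py (by_ep : List (Int × List (List (String × String)))) (num : Int) (group_balanced : Bool) : Prop :=
  group_balanced = true → ∀ p ∈ (PySem.Dict.ofList by_ep).items, p.2 ≠ []
instance (by_ep : List (Int × List (List (String × String)))) (num : Int) (group_balanced : Bool) : Decidable (Pre_select_episodes_py by_ep num group_balanced) := by unfold Pre_select_episodes_py; infer_instance

def pvWitness_select_episodes_py : (List (Int × List (List (String × String)))) × Int × Bool :=
  ([(0, [[("task_group", "g")]]), (1, [[("task_group", "h")]])], 1, true)

def Spec_select_episodes_py (by_ep : List (Int × List (List (String × String)))) (num : Int) (group_balanced : Bool) (out : List Int) : Prop := out = select_episodes_py_alt by_ep num group_balanced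
instance (by_ep : List (Int × List (List (String × String)))) (num : Int) (group_balanced : Bool) (out : List Int) : Decidable (Spec_select_episodes_py by_ep num group_balanced out) := by unfold Spec_select_episodes_py; infer_instance

-- ===== CLAIM (what is proved, stated in full; the proofs are below) =====
def Claim_equal_select_episodes_py : Prop := ∀ (by_ep : List (Int × List (List (String × String)))) (num : Int) (group_balanced : Bool), Dom_select_episodes_py by_ep num group_balanced → Pre_select_episodes_py by_ep num group_balanced → Spec_select_episodes_py by_ep num group_balanced (select_episodes_py by_ep num group_balanced)

-- ===== LEMMAS AND PROOFS =====

-- round-robin reference: heads of the nonempty columns, then recurse on the tails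
def pvColsNE (cols : List (List Int)) : List (List Int) := cols.filter (fun c => !c.isEmpty)

def pvTails (cols : List (List Int)) : List (List Int) := cols.map List.tail

theorem pvSum_tail_le : ∀ (cols : List (List Int)),
    ((pvTails cols).map List.length).sum ≤ (cols.map List.length).sum := by
  intro cols
  induction cols with
  | nil => simp [pvTails]
  | cons c cs ih =>
    simp only [pvTails, List.map_cons, List.sum_cons] at *
    have : c.tail.length ≤ c.length := by
      cases c <;> simp
    omega

theorem pvSum_tail_lt : ∀ (cols : List (List Int)), ¬ cols.all List.isEmpty = true →
    ((pvTails cols).map List.length).sum < (cols.map List.length).sum := by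
  intro cols h
  induction cols with
  | nil => simp at h
  | cons c cs ih =>
    simp only [List.all_cons, Bool.and_eq_true, not_and] at h
    by_cases hc : c.isEmpty
    · have := ih (h hc)
      simp only [pvTails, List.map_cons, List.sum_cons] at *
      have : c.tail.length ≤ c.length := by cases c <;> simp
      omega
    · have h1 : c.tail.length < c.length := by
        cases c with
        | nil => simp at hc
        | cons x xs => simp
      have h2 := pvSum_tail_le cs
      simp only [pvTails, List.map_cons, List.sum_cons] at *
      omega

def pvRR (cols : List (List Int)) : List Int :=
  if h : cols.all List.isEmpty then [] else
    cols.filterMap List.head? ++ pvRR (pvTails cols)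
termination_by (cols.map List.length).sum
decreasing_by
  exact pvSum_tail_lt cols h

theorem pvRR_of_all_empty {cols : List (List Int)} (h : cols.all List.isEmpty) : pvRR cols = [] := by
  rw [pvRR.eq_def]; simp [h]

theorem pvRR_step {cols : List (List Int)} (h : ¬ cols.all List.isEmpty = true) :
    pvRR cols = cols.filterMap List.head? ++ pvRR (cols.map List.tail) := by
  rw [pvRR.eq_def]
  simp only [pvTails, h]
  simp

theorem pvNE_eq_nil_iff {cols : List (List Int)} : pvColsNE cols = [] ↔ cols.all List.isEmpty = true := by
  simp [pvColsNE, List.filter_eq_nil_iff, List.all_eq_true]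

theorem pvFilterMap_head_NE : ∀ (cols : List (List Int)),
    cols.filterMap List.head? = (pvColsNE cols).filterMap List.head? := by
  intro cols
  induction cols with
  | nil => rfl
  | cons c cs ih =>
    cases c with
    | nil => simpa [pvColsNE, List.filter_cons] using ih
    | cons x xs => simp [pvColsNE] at ih ⊢; exact ih

theorem pvNE_tails : ∀ (cols : List (List Int)),
    pvColsNE (cols.map List.tail) = pvColsNE ((pvColsNE cols).map List.tail) := by
  intro cols
  induction cols with
  | nil => rfl
  | cons c cs ih =>
    cases c with
    | nil => simpa [pvColsNE, List.filter_cons] using ih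
    | cons x xs =>
      simp only [pvColsNE, List.map_cons, List.filter_cons] at ih ⊢
      by_cases hx : xs.isEmpty
      · simp [hx] at ih ⊢; exact ih
      · simp [hx] at ih ⊢; exact ih

theorem pvRR_congr : ∀ (N : Nat) (cols cols' : List (List Int)), (cols.map List.length).sum = N →
    pvColsNE cols = pvColsNE cols' → pvRR cols = pvRR cols' := by
  intro N
  induction N using Nat.strong_induction_on with
  | _ N ih =>
    intro cols cols' hN hne
    by_cases hall : cols.all List.isEmpty = true
    · have h1 : pvColsNE cols' = [] := by rw [← hne]; exact pvNE_eq_nil_iff.mpr hall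
      rw [pvRR_of_all_empty hall, pvRR_of_all_empty (pvNE_eq_nil_iff.mp h1)]
    · have hall' : ¬ cols'.all List.isEmpty = true := by
        intro h
        exact hall (pvNE_eq_nil_iff.mp (hne.trans (pvNE_eq_nil_iff.mpr h)))
      rw [pvRR_step hall, pvRR_step hall']
      have hheads : cols.filterMap List.head? = cols'.filterMap List.head? := by
        rw [pvFilterMap_head_NE, hne, ← pvFilterMap_head_NE]
      rw [hheads]
      congr 1
      refine ih ((cols.map List.tail).map List.length).sum ?_ _ _ rfl ?_
      · have := pvSum_tail_lt cols hall
        simp only [pvTails] at this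
        omega
      · rw [pvNE_tails, hne, ← pvNE_tails]

-- A-side characterisation
def pvHeads (g : PySem.Dict String (List Int)) (s : List String) : List Int :=
  s.filterMap (fun k => (g.getD k []).head?)
def pvLive (g : PySem.Dict String (List Int)) (s : List String) : List String :=
  s.filter (fun k => !(g.getD k []).isEmpty)

theorem pvPassA_spec (num : Int) : ∀ (s p : List String) (g : PySem.Dict String (List Int)) (c : List Int),
    (p ++ s).Nodup → (c.length : Int) < num →
    (pvPassA num s (p ++ s) g c).2.2 = c ++ (pvHeads g s).take (num - c.length).toNat ∧
    ((c.length : Int) + (pvHeads g s).length < num →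
      (pvPassA num s (p ++ s) g c).1 = p ++ pvLive g s ∧
      ∀ j, (pvPassA num s (p ++ s) g c).2.1.getD j [] = if j ∈ s then (g.getD j []).tail else g.getD j []) := by
  intro s
  induction s with
  | nil =>
    intro p g c hnd hc
    refine ⟨?_, fun _ => ⟨?_, ?_⟩⟩ <;> simp [pvPassA, pvHeads, pvLive]
  | cons k s ih =>
    intro p g c hnd hc
    have hkp : k ∉ p := by
      intro hk
      exact (List.disjoint_of_nodup_append hnd) hk (List.mem_cons_self ..)
    have hks : k ∉ s := by
      have h2 := hnd.of_append_right
      exact (List.nodup_cons.mp h2).1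
    cases hgk : g.getD k [] with
    | nil =>
      have hrem : (PySem.List.remove? (p ++ k :: s) k).getD (p ++ k :: s) = p ++ s := by
        rw [PySem.List.remove?_eq_some_erase _ k (by simp)]
        rw [List.erase_append_right _ hkp, List.erase_cons_head]
        rfl
      have hnd' : (p ++ s).Nodup :=
        hnd.sublist (List.Sublist.append_left (List.sublist_cons_self k s) p)
      have hH : pvHeads g (k :: s) = pvHeads g s := by
        simp [pvHeads, hgk]
      simp only [pvPassA, hgk, hrem]
      have H := ih p g c hnd' hc
      refine ⟨by rw [H.1, hH], ?_⟩
      intro hlen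
      rw [hH] at hlen
      refine ⟨?_, ?_⟩
      · rw [(H.2 hlen).1]
        have : pvLive g (k :: s) = pvLive g s := by simp [pvLive, hgk]
        rw [this]
      · intro j
        rw [(H.2 hlen).2 j]
        by_cases hj : j ∈ s
        · simp [hj]
        · by_cases hjk : j = k
          · subst hjk; simp [hj, hgk]
          · simp [hj, hjk]
    | cons e t =>
      simp only [pvPassA, hgk]
      have hH : pvHeads g (k :: s) = e :: pvHeads g s := by
        simp [pvHeads, hgk]
      have hHins : pvHeads (g.insert k t) s = pvHeads g s := by
        apply List.filterMap_congr
        intro a ha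
        rw [PySem.Dict.getD_insert_of_ne _ _ _ (fun h => hks (by rw [← h]; exact ha))]
      have hLins : pvLive (g.insert k t) s = pvLive g s := by
        apply List.filter_congr
        intro a ha
        rw [PySem.Dict.getD_insert_of_ne _ _ _ (fun h => hks (by rw [← h]; exact ha))]
      have hlce : (c ++ [e]).length = c.length + 1 := by simp
      by_cases hbr : num ≤ ((c ++ [e]).length : Int)
      · rw [if_pos hbr]
        rw [hlce] at hbr
        have hnum : num = c.length + 1 := by push_cast at hbr; omega
        constructor
        · rw [hH]
          have h1 : (num - (c.length : Int)).toNat = 1 := by omega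
          rw [h1, List.take_succ_cons, List.take_zero]
        · intro hlen
          rw [hH] at hlen
          simp only [List.length_cons] at hlen
          exfalso
          push_cast at hlen
          omega
      · rw [if_neg hbr]
        rw [hlce] at hbr
        have hc1 : (((c ++ [e]).length : Nat) : Int) < num := by
          rw [hlce]; push_cast; push_cast at hbr; omega
        have hrw : p ++ k :: s = (p ++ [k]) ++ s := by simp
        rw [hrw]
        have hnd1 : ((p ++ [k]) ++ s).Nodup := by rw [← hrw]; exact hnd
        have H := ih (p ++ [k]) (g.insert k t) (c ++ [e]) hnd1 hc1
        constructor
        · rw [H.1, hHins, hH]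
          have h2 : (num - (c.length : Int)).toNat = (num - ((c ++ [e]).length : Int)).toNat + 1 := by
            rw [hlce]; push_cast; push_cast at hbr; omega
          rw [h2, List.take_succ_cons, List.append_assoc, List.singleton_append]
        · intro hlen
          rw [hH] at hlen
          have hlen1 : (((c ++ [e]).length : Nat) : Int) + (pvHeads (g.insert k t) s).length < num := by
            rw [hHins, hlce]
            simp only [List.length_cons] at hlen
            push_cast
            push_cast at hlen
            omega
          refine ⟨?_, ?_⟩
          · rw [(H.2 hlen1).1, hLins]
            have : pvLive g (k :: s) = k :: pvLive g s := by
              simp [pvLive, hgk]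
            rw [this, List.append_assoc, List.singleton_append]
          · intro j
            rw [(H.2 hlen1).2 j]
            by_cases hj : j ∈ s
            · have hjk : j ≠ k := fun h => hks (h ▸ hj)
              simp only [if_true, List.mem_cons, hj, or_true]
              rw [PySem.Dict.getD_insert_of_ne _ _ _ hjk]
            · by_cases hjk : j = k
              · subst hjk
                simp only [hj, if_false, List.mem_cons, true_or, if_true]
                rw [PySem.Dict.getD_insert_self, hgk]
                rfl
              · simp only [hj, if_false, List.mem_cons, hjk, false_or]
                rw [PySem.Dict.getD_insert_of_ne _ _ _ hjk]

theorem pvHeads_eq (g : PySem.Dict String (List Int)) (keys : List String) :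
    pvHeads g keys = (keys.map (fun k => g.getD k [])).filterMap List.head? := by
  rw [List.filterMap_map]
  rfl

theorem pvNE_cols (g : PySem.Dict String (List Int)) (keys : List String) :
    pvColsNE (keys.map (fun k => g.getD k [])) = (pvLive g keys).map (fun k => g.getD k []) := by
  rw [pvColsNE, List.filter_map]
  rfl

theorem pvHeads_eq_nil {g : PySem.Dict String (List Int)} {keys : List String}
    (hall : (keys.map (fun k => g.getD k [])).all List.isEmpty = true) : pvHeads g keys = [] := by
  rw [pvHeads_eq, List.filterMap_eq_nil_iff]
  intro a ha
  have h := List.all_eq_true.mp hall a ha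
  rw [List.head?_eq_none_iff]
  exact List.isEmpty_iff.mp h

theorem pvLoopA_spec : ∀ (num : Int) (keys : List String) (g : PySem.Dict String (List Int)) (c : List Int), keys.Nodup →
    pvLoopA num keys g c = c ++ (pvRR (keys.map (fun k => g.getD k []))).take (num - c.length).toNat := by
  intro num keys g c
  induction keys, g, c using pvLoopA.induct num with
  | case1 keys g c h st ih =>
    intro hnd
    rw [pvLoopA.eq_def]
    simp only [dif_pos h]
    have hps := pvPassA_spec num keys [] g c (by simpa using hnd) h.1
    simp only [List.nil_append] at hps
    by_cases hfull : (c.length : Int) + (pvHeads g keys).length < num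
    · have hkeys' := (hps.2 hfull).1
      have hdict := (hps.2 hfull).2
      have hch : (pvPassA num keys keys g c).2.2 = c ++ pvHeads g keys := by
        rw [hps.1, List.take_of_length_le (by omega)]
      have hnd' : (pvPassA num keys keys g c).1.Nodup := by
        rw [hkeys']; exact hnd.filter _
      rw [ih hnd']
      have hcols' : (pvPassA num keys keys g c).1.map (fun k => (pvPassA num keys keys g c).2.1.getD k []) =
          (pvColsNE (keys.map (fun k => g.getD k []))).map List.tail := by
        rw [hkeys', pvNE_cols, List.map_map]
        apply List.map_congr_left
        intro j hj
        have hjk : j ∈ keys := List.mem_of_mem_filter hj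
        rw [hdict j, if_pos hjk]
        rfl
      rw [hcols', hch]
      by_cases hall : (keys.map (fun k => g.getD k [])).all List.isEmpty = true
      · have hH : pvHeads g keys = [] := pvHeads_eq_nil hall
        have hNE : pvColsNE (keys.map (fun k => g.getD k [])) = [] := pvNE_eq_nil_iff.mpr hall
        rw [pvRR_of_all_empty hall, hH, hNE]
        simp [pvRR_of_all_empty]
      · rw [pvRR_step hall]
        have hcongr : pvRR ((pvColsNE (keys.map (fun k => g.getD k []))).map List.tail) =
            pvRR ((keys.map (fun k => g.getD k [])).map List.tail) :=
          pvRR_congr _ _ _ rfl (pvNE_tails _).symm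
        rw [hcongr, ← pvHeads_eq]
        rw [List.take_append]
        have h1 : List.take (num - (c.length : Int)).toNat (pvHeads g keys) = pvHeads g keys :=
          List.take_of_length_le (by omega)
        rw [h1]
        have h2 : (num - ((c ++ pvHeads g keys).length : Int)).toNat =
            (num - (c.length : Int)).toNat - (pvHeads g keys).length := by
          rw [List.length_append]; push_cast; omega
        rw [h2, List.append_assoc]
    · have hch := hps.1
      have hnd' : (pvPassA num keys keys g c).1.Nodup :=
        hnd.sublist (pvPassA_keys_sublist num keys keys g c)
      rw [ih hnd']
      have hstlen : (pvPassA num keys keys g c).2.2.length = c.length + (num - (c.length : Int)).toNat := by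
        rw [hch, List.length_append, List.length_take]
        congr 1
        omega
      have h0 : (num - ((pvPassA num keys keys g c).2.2.length : Int)).toNat = 0 := by
        rw [hstlen]; push_cast; omega
      rw [h0, List.take_zero, List.append_nil, hch]
      have hHne : ¬ (keys.map (fun k => g.getD k [])).all List.isEmpty = true := by
        intro hall
        have hH : pvHeads g keys = [] := pvHeads_eq_nil hall
        rw [hH] at hfull
        simp at hfull
        omega
      rw [pvRR_step hHne, ← pvHeads_eq, List.take_append]
      have h3 : (num - (c.length : Int)).toNat - (pvHeads g keys).length = 0 := by omega
      rw [h3, List.take_zero, List.append_nil]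
  | case2 keys g c h =>
    intro _
    rw [pvLoopA.eq_def]
    simp only [dif_neg h]
    rcases Decidable.not_and_iff_not_or_not.mp h with hc | hk
    · have : (num - (c.length : Int)).toNat = 0 := by omega
      rw [this, List.take_zero, List.append_nil]
    · have hkeys : keys = [] := by
        by_contra hne
        exact hk hne
      subst hkeys
      rw [pvRR_of_all_empty (by simp)]
      simp

theorem pvFilterMap_if {α β : Type} (p : α → Bool) (g : α → β) (l : List α) :
    (l.filter p).map g = l.filterMap (fun a => if p a then some (g a) else none) := by
  induction l with
  | nil => rfl
  | cons a l ih =>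
    by_cases h : p a <;> simp [h, ih]

theorem pvLayerB_eq (cols : List (List Int)) (r : Int) (hr : 0 ≤ r) :
    pvLayerB (pvAlive cols r) r = (cols.map (List.drop r.toNat)).filterMap List.head? := by
  rw [pvAlive, pvLayerB, pvFilterMap_if, List.filterMap_map]
  apply List.filterMap_congr
  intro col _
  simp only [Function.comp]
  by_cases h : r < (col.length : Int)
  · rw [if_pos (by simpa using h), List.head?_drop]
    have hlt : r.toNat < col.length := by omega
    rw [PySem.List.pyGetD_eq_getElem col 0 hr h, List.getElem?_eq_getElem hlt]
  · rw [if_neg (by simpa using h)]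
    have hge : col.length ≤ r.toNat := by omega
    rw [List.drop_eq_nil_of_le hge]
    rfl

theorem pvNE_alive (cols : List (List Int)) (r : Int) (hr : 0 ≤ r) :
    pvColsNE ((pvAlive cols r).map (List.drop (r + 1).toNat)) = pvColsNE (cols.map (List.drop (r + 1).toNat)) := by
  induction cols with
  | nil => rfl
  | cons col cs ih =>
    by_cases h : r < (col.length : Int)
    · simp only [pvAlive, List.filter_cons, List.map_cons] at ih ⊢
      rw [if_pos (by simpa using h)]
      simp only [List.map_cons, pvColsNE, List.filter_cons] at ih ⊢
      split <;> simp [ih]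
    · simp only [pvAlive, List.filter_cons, List.map_cons] at ih ⊢
      rw [if_neg (by simpa using h)]
      have hnil : List.drop (r + 1).toNat col = [] := List.drop_eq_nil_of_le (by omega)
      simp only [pvColsNE, List.filter_cons, hnil] at ih ⊢
      simp [ih]

theorem pvLoopB_spec : ∀ (num : Int) (cols : List (List Int)) (r : Int) (c : List Int), 0 ≤ r →
    ∃ L, pvLoopB num cols r c = c ++ L ∧ List.IsPrefix L (pvRR (cols.map (List.drop r.toNat))) ∧
      ((num : Int) ≤ (c.length + L.length : Nat) ∨ L = pvRR (cols.map (List.drop r.toNat))) := by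
  intro num cols r c
  induction cols, r, c using pvLoopB.induct num with
  | case1 cols r c h hl =>
    intro hr
    refine ⟨[], ?_, List.nil_prefix, Or.inr ?_⟩
    · rw [pvLoopB.eq_def]
      simp only [dif_pos h, hl]
      simp
    · have hall : (cols.map (List.drop r.toNat)).all List.isEmpty = true := by
        rw [List.all_eq_true]
        intro a ha
        obtain ⟨col, hcol, rfl⟩ := List.mem_map.mp ha
        have hc := List.filter_eq_nil_iff.mp hl col hcol
        simp only [decide_eq_true_eq] at hc
        rw [List.drop_eq_nil_of_le (by omega)]
        rfl
      rw [pvRR_of_all_empty hall]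
  | case2 cols r c h hl ih =>
    intro hr
    obtain ⟨L', hB, hpre, hdisj⟩ := ih (by omega)
    have hall : ¬ (cols.map (List.drop r.toNat)).all List.isEmpty = true := by
      intro hall
      apply hl
      rw [pvAlive, List.filter_eq_nil_iff]
      intro col hcol
      have := List.all_eq_true.mp hall _ (List.mem_map_of_mem hcol)
      rw [List.isEmpty_iff, List.drop_eq_nil_iff] at this
      simp only [decide_eq_true_eq]
      omega
    have hdrops : (cols.map (List.drop r.toNat)).map List.tail = cols.map (List.drop (r + 1).toNat) := by
      rw [List.map_map]
      apply List.map_congr_left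
      intro col _
      have h1 : (r + 1).toNat = r.toNat + 1 := by omega
      simp only [Function.comp, List.tail_drop, h1]
    have hstep : pvRR (cols.map (List.drop r.toNat)) =
        pvLayerB (pvAlive cols r) r ++ pvRR ((pvAlive cols r).map (List.drop (r + 1).toNat)) := by
      rw [pvRR_step hall, hdrops, ← pvLayerB_eq cols r hr]
      congr 1
      exact (pvRR_congr _ _ _ rfl (pvNE_alive cols r hr)).symm
    refine ⟨pvLayerB (pvAlive cols r) r ++ L', ?_, ?_, ?_⟩
    · rw [pvLoopB.eq_def]
      simp only [dif_pos h, dif_neg hl]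
      rw [hB, List.append_assoc]
    · obtain ⟨tl, htl⟩ := hpre
      exact ⟨tl, by rw [List.append_assoc, htl, ← hstep]⟩
    · rcases hdisj with hle | heq
      · left
        simp only [List.length_append] at hle ⊢
        push_cast at hle ⊢
        omega
      · right
        rw [heq, ← hstep]
  | case3 cols r c h =>
    intro _
    refine ⟨[], ?_, List.nil_prefix, Or.inl (by push_cast; omega)⟩
    rw [pvLoopB.eq_def]
    simp [dif_neg h]

-- ===== VERDICT (by name: the statement is the Claim_ definition above) =====
theorem select_episodes_py_spec : Claim_equal_select_episodes_py := by
  unfold Claim_equal_select_episodes_py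
  intro by_ep num gb _ _
  unfold Spec_select_episodes_py select_episodes_py select_episodes_py_alt
  cases gb with
  | false => rfl
  | true =>
    simp only [reduceCtorEq, if_false]
    have hnd : (PySem.List.sorted ((PySem.Dict.ofList by_ep).items.foldl (fun bg p => bg.modify (pvGroupKey p.2) [] (fun l => l ++ [p.1])) PySem.Dict.empty).keys (fun k => k) false).Nodup := by
      have h1 : ((PySem.Dict.ofList by_ep).items.foldl (fun bg p => bg.modify (pvGroupKey p.2) [] (fun l => l ++ [p.1])) PySem.Dict.empty).keys.Nodup :=
        PySem.Dict.nodup_keys_foldl_modify_key _ _ _ _ _ (by simp [PySem.Dict.keys_empty])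
      exact ((PySem.List.sorted_perm _ (fun k => k) false).nodup_iff).mpr h1
    set G := (PySem.Dict.ofList by_ep).items.foldl (fun bg p => bg.modify (pvGroupKey p.2) [] (fun l => l ++ [p.1])) PySem.Dict.empty with hG
    set K := PySem.List.sorted G.keys (fun k => k) false with hK
    set cols := K.map (fun k => G.getD k []) with hcols
    by_cases hn : 0 ≤ num
    · rw [pvLoopA_spec num K G [] hnd]
      obtain ⟨L, hB, hpre, hdisj⟩ := pvLoopB_spec num cols 0 [] le_rfl
      rw [hB]
      have hdrop0 : cols.map (List.drop (0 : Int).toNat) = cols := by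
        have he : List.drop (0 : Int).toNat = fun l : List Int => l := by
          funext l
          simp
        rw [he, List.map_id']
      rw [hdrop0] at hpre hdisj
      simp only [List.nil_append, List.length_nil, Nat.cast_zero, sub_zero] at *
      rw [PySem.List.slice_to _ hn, PySem.List.slice_to _ hn]
      rw [List.take_take, min_self]
      rcases hdisj with hle | heq
      · obtain ⟨tl, htl⟩ := hpre
        rw [← htl, List.take_append]
        have h0 : num.toNat - L.length = 0 := by omega
        rw [h0, List.take_zero, List.append_nil]
      · rw [heq]
    · have hA : pvLoopA num K G [] = [] := by
        rw [pvLoopA.eq_def, dif_neg]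
        intro hcon
        have := hcon.1
        simp at this
        omega
      have hBn : pvLoopB num cols 0 [] = [] := by
        rw [pvLoopB.eq_def, dif_neg]
        simp
        omega
      rw [hA, hBn]
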